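-- pv_equiv track=rewrite | github.com/TitechMeister/helium | python/cobs.py | cobs_decode
-- ===== SOURCE A (Python) =====
-- def cobs_decode(enc_data:list[int]):
--     dec_data:list[int] = []
--     enc_idx = 0
--
--     next_0x00 = 0
--     next_is_overhead = True
--     is_end = False
--
--     while enc_idx < len(enc_data):
--         if next_0x00 != 0:
--             dec_data.append(enc_data[enc_idx])
--             enc_idx += 1
--         else:
--             if enc_data[enc_idx] == 0x00:
--                 is_end = True
--                 # 終端コード(0x00)発見時は処理を終了する。
--                 break
--
--             if next_is_overhead == True:
--                 pass
--             else:
--                 dec_data.append(0)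
--
--             next_0x00 = enc_data[enc_idx]
--             enc_idx += 1
--
--             if next_0x00 == 0xff:
--                 next_is_overhead = True
--             else:
--                 next_is_overhead = False
--         next_0x00 -= 1
--
--     if is_end == False:
--         # 終端コード(0x00)が見つからなかった場合は、
--         # []を返す。
--         return [], enc_data
--     return dec_data, enc_data[enc_idx+1:]
-- ===== SOURCE B (Python) =====
-- def cobs_decode(enc_data: list[int]):
--     # Block-structured decoder: read each code byte, bulk-copy its block,
--     # instead of A's per-byte state-machine countdown.
--     dec_data: list[int] = []
--     i = 0
--     prev_overhead = True
--     while i < len(enc_data):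
--         code = enc_data[i]
--         if code == 0x00:
--             # terminator: decoding succeeded
--             return dec_data, enc_data[i + 1:]
--         if not prev_overhead:
--             dec_data.append(0)
--         chunk = enc_data[i + 1:i + code]
--         if len(chunk) != code - 1:
--             # truncated (or malformed) block: no terminator will be found
--             break
--         dec_data.extend(chunk)
--         i += code
--         prev_overhead = (code == 0xff)
--     return [], enc_data
-- ===== Notes on version B (the rewrite author's own statement) =====
-- stated objective: alternative
-- what changed: Replaced A's per-byte state machine (countdown next_0x00 / next_is_overhead flags deciding each byte's fate) by a block-structured decoder that reads each code byte and bulk-copies its code-1 data bytes with one slice, treating a short slice as the truncated-frame exit.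
import Mathlib
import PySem

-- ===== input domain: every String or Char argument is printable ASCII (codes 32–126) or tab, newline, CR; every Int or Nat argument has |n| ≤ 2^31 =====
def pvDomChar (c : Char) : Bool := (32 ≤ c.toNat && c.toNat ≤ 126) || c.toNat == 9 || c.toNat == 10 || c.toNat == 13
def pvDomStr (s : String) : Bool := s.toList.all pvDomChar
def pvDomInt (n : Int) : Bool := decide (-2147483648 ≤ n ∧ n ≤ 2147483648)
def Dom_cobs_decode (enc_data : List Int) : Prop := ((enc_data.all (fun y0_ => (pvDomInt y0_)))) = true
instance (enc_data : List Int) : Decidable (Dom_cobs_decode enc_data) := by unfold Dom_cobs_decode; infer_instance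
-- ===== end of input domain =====

-- B replaces A's per-byte countdown state machine by a block-at-a-time decoder
-- (read the code byte, bulk-copy the whole block); objective: alternative decomposition.

-- ===== PORT A =====
-- A's while loop: state (dec_data, enc_idx, next_0x00, next_is_overhead);
-- returns (dec_data, enc_idx, is_end). The fuel argument only makes the
-- recursion structural: every iteration increments enc_idx, so fuel
-- enc.length - idx never runs out while idx < enc.length, and the fuel-0
-- result coincides with the loop-exit result there. Indexing enc.getD idx 0
-- is exact: the while condition guarantees idx < enc.length wherever it is read.
def cobsLoopA (enc : List Int) : Nat → Nat → List Int → Int → Bool → List Int × Nat × Bool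
  | fuel + 1, idx, dec, next0, overhead =>
    if idx < enc.length then
      if next0 ≠ 0 then
        cobsLoopA enc fuel (idx + 1) (dec ++ [enc.getD idx 0]) (next0 - 1) overhead
      else if enc.getD idx 0 = 0 then
        (dec, idx, true)
      else
        let b := enc.getD idx 0
        let dec' := if overhead then dec else dec ++ [0]
        cobsLoopA enc fuel (idx + 1) dec' (b - 1) (b = 0xff)
    else (dec, idx, false)
  | 0, idx, dec, _, _ => (dec, idx, false)

def cobs_decode (enc_data : List Int) : List Int × List Int :=
  let r := cobsLoopA enc_data enc_data.length 0 [] 0 true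
  if r.2.2 = false then ([], enc_data)
  else (r.1, PySem.List.slice enc_data (some ((r.2.1 : Int) + 1)) none)

-- ===== PORT B =====
-- B's while loop: state (dec_data, i, prev_overhead); 'return'/'break' become
-- the two result branches. Fuel as above: each iteration advances i by
-- code ≥ 1, so fuel enc.length - i suffices and fuel 0 implies i ≥ enc.length,
-- where the result is the same ([], enc).
def cobsLoopB (enc : List Int) : Nat → Nat → List Int → Bool → List Int × List Int
  | fuel + 1, i, dec, prevOv =>
    if i < enc.length then
      let code := enc.getD i 0
      if code = 0 then
        (dec, PySem.List.slice enc (some ((i : Int) + 1)) none)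
      else
        let dec' := if prevOv then dec else dec ++ [0]
        let chunk := PySem.List.slice enc (some ((i : Int) + 1)) (some ((i : Int) + code))
        if (chunk.length : Int) ≠ code - 1 then ([], enc)
        else cobsLoopB enc fuel (i + code.toNat) (dec' ++ chunk) (code = 0xff)
    else ([], enc)
  | 0, _, _, _ => ([], enc)

def cobs_decode_alt (enc_data : List Int) : List Int × List Int :=
  cobsLoopB enc_data enc_data.length 0 [] true

-- ===== PRECONDITION & SPEC =====
def Spec_cobs_decode (enc_data : List Int) (out : List Int × List Int) : Prop := out = cobs_decode_alt enc_data
instance (enc_data : List Int) (out : List Int × List Int) : Decidable (Spec_cobs_decode enc_data out) := by unfold Spec_cobs_decode; infer_instance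

-- ===== CLAIM (what is proved, stated in full; the proofs are below) =====
def Claim_equal_cobs_decode : Prop := ∀ (enc_data : List Int), Dom_cobs_decode enc_data → Spec_cobs_decode enc_data (cobs_decode enc_data)

-- ===== LEMMAS AND PROOFS =====

-- what cobs_decode does with the loop result
def postA (enc : List Int) (r : List Int × Nat × Bool) : List Int × List Int :=
  if r.2.2 = false then ([], enc)
  else (r.1, PySem.List.slice enc (some ((r.2.1 : Int) + 1)) none)

-- A's countdown never finds the terminator when the count is negative or
-- overruns the end of the list.
lemma countdown_off (enc : List Int) : ∀ (fuel j : Nat) (dec : List Int) (m : Int) (ov : Bool),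
    (m < 0 ∨ (0 < m ∧ (enc.length : Int) < (j : Int) + m)) →
    (cobsLoopA enc fuel j dec m ov).2.2 = false := by
  intro fuel
  induction fuel with
  | zero => intro j dec m ov _; rfl
  | succ fuel ih =>
    intro j dec m ov hm
    by_cases hj : j < enc.length
    · have hm0 : m ≠ 0 := by omega
      show (cobsLoopA enc (fuel + 1) j dec m ov).2.2 = false
      rw [cobsLoopA]
      simp only [hj, if_pos, hm0, ne_eq, not_false_eq_true]
      exact ih (j + 1) (dec ++ [enc.getD j 0]) (m - 1) ov (by omega)
    · show (cobsLoopA enc (fuel + 1) j dec m ov).2.2 = false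
      rw [cobsLoopA]; simp [hj]

-- A's countdown with count m that fits in the list consumes exactly m bytes
-- (and m units of fuel).
lemma countdown_take (enc : List Int) (m : Nat) :
    ∀ (fuel j : Nat) (dec : List Int) (ov : Bool),
    j + m ≤ enc.length → m ≤ fuel →
    cobsLoopA enc fuel j dec (m : Int) ov
      = cobsLoopA enc (fuel - m) (j + m) (dec ++ (enc.drop j).take m) 0 ov := by
  induction m with
  | zero => intro fuel j dec ov _ _; simp
  | succ m ih =>
    intro fuel j dec ov hle hfuel
    have hj : j < enc.length := by omega
    obtain ⟨fuel, rfl⟩ : ∃ f, fuel = f + 1 := ⟨fuel - 1, by omega⟩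
    rw [cobsLoopA]
    have hm : ((m : Int) + 1) ≠ 0 := by omega
    simp only [hj, if_pos, Nat.cast_add, Nat.cast_one, hm, ne_eq, not_false_eq_true,
      add_sub_cancel_right]
    rw [ih fuel (j + 1) (dec ++ [enc.getD j 0]) ov (by omega) (by omega)]
    have hdrop : (enc.drop j).take (m + 1) = enc.getD j 0 :: (enc.drop (j + 1)).take m := by
      have : enc.drop j = enc.getD j 0 :: enc.drop (j + 1) := by
        rw [List.getD_eq_getElem _ _ hj]
        exact (List.drop_eq_getElem_cons hj)
      rw [this, List.take_succ_cons]
    rw [hdrop]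
    have h1 : j + 1 + m = j + (m + 1) := by omega
    have h2 : fuel - m = fuel + 1 - (m + 1) := by omega
    rw [h1, h2, List.append_assoc]
    rfl

-- Main correspondence: from any code-byte state with enough fuel on both
-- sides, A's loop (post-processed) equals B's loop.
lemma loop_eq (enc : List Int) : ∀ (fB fA idx : Nat) (dec : List Int) (ov : Bool),
    enc.length - idx ≤ fA → enc.length - idx ≤ fB →
    postA enc (cobsLoopA enc fA idx dec 0 ov) = cobsLoopB enc fB idx dec ov := by
  intro fB
  induction fB with
  | zero =>
    intro fA idx dec ov hA hB
    have hidx : ¬ idx < enc.length := by omega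
    have hAval : cobsLoopA enc fA idx dec 0 ov = (dec, idx, false) := by
      cases fA with
      | zero => rfl
      | succ fA => rw [cobsLoopA]; simp [hidx]
    rw [hAval]
    rfl
  | succ fB ih =>
    intro fA idx dec ov hA hB
    by_cases hidx : idx < enc.length
    · obtain ⟨fA, rfl⟩ : ∃ f, fA = f + 1 := ⟨fA - 1, by omega⟩
      rw [cobsLoopA, cobsLoopB]
      simp only [hidx, if_pos, ne_eq, not_true_eq_false, if_false]
      set b := enc.getD idx 0 with hb
      by_cases hb0 : b = 0
      · simp [hb0, postA]
      · simp only [hb0, if_false, if_neg hb0]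
        set dec' := if ov then dec else dec ++ [0] with hdec'
        set chunk := PySem.List.slice enc (some ((idx : Int) + 1)) (some ((idx : Int) + b)) with hchunk
        by_cases hfit : 0 < b ∧ (idx : Int) + b ≤ (enc.length : Int)
        · -- block fits: A consumes b-1 bytes, B copies the chunk
          obtain ⟨hbpos, hble⟩ := hfit
          have hchunkval : chunk = (enc.drop (idx + 1)).take (b - 1).toNat := by
            have h1 : ((idx : Int) + 1).toNat = idx + 1 := by omega
            have h2 : ((idx : Int) + b).toNat - (idx + 1) = (b - 1).toNat := by omega
            rw [hchunk, PySem.List.slice_toNat, h1, h2]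
            all_goals omega
          have hlen : (chunk.length : Int) = b - 1 := by
            rw [hchunkval]
            simp only [List.length_take, List.length_drop]
            omega
          rw [show b - 1 = (((b - 1).toNat : Nat) : Int) from by omega,
            countdown_take enc (b - 1).toNat fA (idx + 1) dec' (decide (b = 255))
              (by omega) (by omega)]
          rw [ih (fA - (b - 1).toNat) (idx + 1 + (b - 1).toNat)
            (dec' ++ (enc.drop (idx + 1)).take (b - 1).toNat)
            (decide (b = 255)) (by omega) (by omega)]
          have hidxeq : idx + 1 + (b - 1).toNat = idx + b.toNat := by omega
          rw [hidxeq, hchunkval.symm]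
          rw [if_neg (by rw [hlen]; omega)]
        · -- block does not fit (negative code or truncated): both fail
          have hA0 : (cobsLoopA enc fA (idx + 1) dec' (b - 1) (decide (b = 255))).2.2 = false := by
            apply countdown_off
            by_cases hbneg : b < 0
            · left; omega
            · right
              have hb1 : 0 < b := by omega
              have hgt : ¬ ((idx : Int) + b ≤ (enc.length : Int)) := fun hc => hfit ⟨hb1, hc⟩
              exact ⟨by omega, by omega⟩
          have hBlen : (chunk.length : Int) ≠ b - 1 := by
            by_cases hbneg : b < 0
            · have : 0 ≤ (chunk.length : Int) := by positivity
              omega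
            · have hb1 : 0 < b := by omega
              have hgt : (enc.length : Int) < (idx : Int) + b := by
                have : ¬ ((idx : Int) + b ≤ (enc.length : Int)) := fun hc => hfit ⟨hb1, hc⟩
                omega
              have hchunkval : chunk = (enc.drop (idx + 1)).take (b - 1).toNat := by
                have h1 : ((idx : Int) + 1).toNat = idx + 1 := by omega
                have h2 : ((idx : Int) + b).toNat - (idx + 1) = (b - 1).toNat := by omega
                rw [hchunk, PySem.List.slice_toNat, h1, h2]
                all_goals omega
              rw [hchunkval]
              simp only [List.length_take, List.length_drop]
              omega
          rw [if_pos hBlen]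
          unfold postA
          rw [hA0]
          simp
    · have hAval : cobsLoopA enc fA idx dec 0 ov = (dec, idx, false) := by
        cases fA with
        | zero => rfl
        | succ fA => rw [cobsLoopA]; simp [hidx]
      rw [cobsLoopB, hAval]
      simp [hidx, postA]

-- ===== VERDICT (by name: the statement is the Claim_ definition above) =====
theorem cobs_decode_spec : Claim_equal_cobs_decode := by
  intro enc _
  unfold Spec_cobs_decode cobs_decode cobs_decode_alt
  rw [← loop_eq enc enc.length enc.length 0 [] true (by omega) (by omega)]
  rfl
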